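-- pv_equiv track=rewrite | github.com/alchemistlee/LiteBoots | util/str_utility.py | rm_redundant_space_in_str
-- ===== SOURCE A (Python) =====
-- def is_alphabet(ch):
--   if (ch >= u'\u0041' and ch <= u'\u005a') or (ch >= u'\u0061' and ch <= u'\u007a') :
--     return True
--   return False
--
-- def rm_redundant_space_in_str(input_str):
--   tmp_lst = input_str.split()
--   res = list()
--   for i in range(0,len(tmp_lst)):
--     cur = tmp_lst[i]
--     next = None
--
--     if i+1 < len(tmp_lst):
--       next = tmp_lst[i+1]
--
--     if next is None:
--       res.append(cur)
--       continue
--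
--     cur_end = cur[-1]
--     next_beg = next[0]
--     if is_alphabet(cur_end) and is_alphabet(next_beg):
--       cur+=' '
--     res.append(cur)
--
--   return ''.join(res)
-- ===== SOURCE B (Python) =====
-- def _alpha(ch):
--   return ('A' <= ch <= 'Z') or ('a' <= ch <= 'z')
--
-- def rm_redundant_space_in_str(input_str):
--   # single pass over characters; never builds the token list
--   out = []
--   prev = ''
--   gap = False
--   for ch in input_str:
--     if ch.isspace():
--       gap = True
--     else:
--       if out and gap and _alpha(prev) and _alpha(ch):
--         out.append(' ')
--       out.append(ch)
--       prev = ch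
--       gap = False
--   return ''.join(out)
-- ===== Notes on version B (the rewrite author's own statement) =====
-- stated objective: alternative
-- what changed: B replaces split()+indexed pairwise token loop with a single character-level scan keeping only the last emitted char and a gap flag, never materializing the token list.
import Mathlib
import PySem

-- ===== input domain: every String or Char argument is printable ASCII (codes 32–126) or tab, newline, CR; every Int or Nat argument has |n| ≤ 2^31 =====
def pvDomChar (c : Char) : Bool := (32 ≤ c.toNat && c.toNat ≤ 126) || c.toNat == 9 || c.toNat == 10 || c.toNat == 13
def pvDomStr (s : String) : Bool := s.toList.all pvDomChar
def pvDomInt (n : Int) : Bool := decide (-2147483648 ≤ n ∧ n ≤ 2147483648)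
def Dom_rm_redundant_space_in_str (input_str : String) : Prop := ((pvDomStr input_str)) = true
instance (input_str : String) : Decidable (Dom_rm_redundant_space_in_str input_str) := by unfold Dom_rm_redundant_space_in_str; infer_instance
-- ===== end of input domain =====

-- B replaces split()+pairwise token loop with a single character scan (gap flag + last emitted char); same O(n) cost, no token list.

-- ===== PORT A =====
-- helper is_alphabet(ch) of the module
def is_alphabet (ch : Char) : Bool :=
  if ('A' ≤ ch ∧ ch ≤ 'Z') ∨ ('a' ≤ ch ∧ ch ≤ 'z') then true else false

-- is_alphabet applied to an indexing result; the index never misses (split() tokens are nonempty)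
def isAlphaGetA (o : Option Char) : Bool :=
  match o with
  | some c => is_alphabet c
  | none => false

-- A's loop over i in range(len(tmp_lst)) reading tmp_lst[i] and tmp_lst[i+1], as the
-- obvious structural recursion with lookahead over the same token list
def goA : List (List Char) → List (List Char)
  | [] => []
  | cur :: rest =>
    match rest with
    | [] => [cur]                       -- next is None
    | nxt :: _ =>
      let cur' := if isAlphaGetA (PySem.List.pyGet? cur (-1)) && isAlphaGetA (PySem.List.pyGet? nxt 0)
                  then cur ++ [' '] else cur
      cur' :: goA rest

def rm_redundant_space_in_str (input_str : String) : String :=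
  String.ofList (goA (PySem.Chars.split₀ input_str.toList)).flatten   -- ''.join(res)

-- ===== PORT B =====
def altIsAlpha (c : Char) : Bool :=
  decide (('A' ≤ c ∧ c ≤ 'Z') ∨ ('a' ≤ c ∧ c ≤ 'z'))

-- _alpha(prev) where prev starts as '' (non-letter): Option, none ↦ false
def altIsAlphaPrev (o : Option Char) : Bool :=
  match o with
  | some c => altIsAlpha c
  | none => false

-- the single pass: out = chars emitted, prev = last emitted char, gap = whitespace seen since
def goB : List Char → List Char → Option Char → Bool → List Char
  | [], out, _, _ => out
  | c :: cs, out, prev, gap =>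
    if PySem.Chars.isspace c then
      goB cs out prev true
    else
      let out' := if !out.isEmpty && gap && altIsAlphaPrev prev && altIsAlpha c
                  then out ++ [' ', c] else out ++ [c]
      goB cs out' (some c) false

def rm_redundant_space_in_str_alt (input_str : String) : String :=
  String.ofList (goB input_str.toList [] none false)

-- ===== PRECONDITION & SPEC =====
def Spec_rm_redundant_space_in_str (input_str : String) (out : String) : Prop := out = rm_redundant_space_in_str_alt input_str
instance (input_str : String) (out : String) : Decidable (Spec_rm_redundant_space_in_str input_str out) := by unfold Spec_rm_redundant_space_in_str; infer_instance

-- ===== CLAIM (what is proved, stated in full; the proofs are below) =====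
def Claim_equal_rm_redundant_space_in_str : Prop := ∀ (input_str : String), Dom_rm_redundant_space_in_str input_str → Spec_rm_redundant_space_in_str input_str (rm_redundant_space_in_str input_str)

-- ===== LEMMAS AND PROOFS =====

-- A's joined result for a token list
def joinA (ws : List (List Char)) : List Char := (goA ws).flatten

lemma alpha_eq (c : Char) : altIsAlpha c = is_alphabet c := by
  simp [altIsAlpha, is_alphabet]

lemma pyGet?_zero (w : List Char) : PySem.List.pyGet? w 0 = w.head? := by
  cases w <;> simp [PySem.List.pyGet?, PySem.List.pyIdx?]

lemma pyGet?_neg_one (w : List Char) (h : w ≠ []) : PySem.List.pyGet? w (-1) = w.getLast? := by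
  cases w with
  | nil => simp at h
  | cons a l =>
    simp [PySem.List.pyGet?, PySem.List.pyIdx?]
    rw [List.getLast?_eq_getElem?]
    simp

lemma altIsAlphaPrev_eq (o : Option Char) : altIsAlphaPrev o = isAlphaGetA o := by
  cases o <;> simp [altIsAlphaPrev, isAlphaGetA, alpha_eq]

lemma goA_cons (x : List Char) (l : List (List Char)) (h : l ≠ []) :
    goA (x :: l) = (if isAlphaGetA (PySem.List.pyGet? x (-1)) && isAlphaGetA (PySem.List.pyGet? (l.headD []) 0)
                    then x ++ [' '] else x) :: goA l := by
  cases l with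
  | nil => exact absurd rfl h
  | cons y r => simp [goA]

lemma joinA_head (w : List Char) (r : List (List Char)) : ∃ t, joinA (w :: r) = w ++ t := by
  cases r with
  | nil => exact ⟨[], by simp [joinA, goA]⟩
  | cons y s =>
    rw [joinA, goA_cons _ _ (by simp)]
    split
    · exact ⟨[' '] ++ (goA (y :: s)).flatten, by simp⟩
    · exact ⟨(goA (y :: s)).flatten, by simp⟩

lemma joinA_ne_nil (w : List Char) (r : List (List Char)) (hw : w ≠ []) : joinA (w :: r) ≠ [] := by
  obtain ⟨t, ht⟩ := joinA_head w r
  simp [ht, hw]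

lemma joinA_append_word (ws : List (List Char)) (t w' : List Char) :
    joinA (ws ++ [t] ++ [w']) =
      joinA (ws ++ [t]) ++
        (if isAlphaGetA (PySem.List.pyGet? t (-1)) && isAlphaGetA (PySem.List.pyGet? w' 0)
         then [' '] else []) ++ w' := by
  induction ws with
  | nil =>
    simp only [List.nil_append, joinA, goA]
    split <;> simp [goA, *]
  | cons x xs ih =>
    have h1 : xs ++ [t] ++ [w'] ≠ [] := by simp
    have h2 : xs ++ [t] ≠ [] := by simp
    have hh : (xs ++ [t] ++ [w']).headD [] = (xs ++ [t]).headD [] := by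
      cases xs <;> simp
    simp only [List.cons_append, joinA, goA_cons _ _ h1, goA_cons _ _ h2, hh] at *
    simp only [List.flatten_cons] at ih ⊢
    rw [ih]
    simp

lemma joinA_extend_last (ws : List (List Char)) (p : List Char) (c : Char) (hp : p ≠ []) :
    joinA (ws ++ [p ++ [c]]) = joinA (ws ++ [p]) ++ [c] := by
  induction ws with
  | nil => simp [joinA, goA]
  | cons x xs ih =>
    have h1 : xs ++ [p ++ [c]] ≠ [] := by simp
    have h2 : xs ++ [p] ≠ [] := by simp
    have hh : PySem.List.pyGet? ((xs ++ [p ++ [c]]).headD []) 0 = PySem.List.pyGet? ((xs ++ [p]).headD []) 0 := by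
      cases xs with
      | nil =>
        cases p with
        | nil => exact absurd rfl hp
        | cons q qs => simp
      | cons y ys => simp
    simp only [List.cons_append, joinA, goA_cons _ _ h1, goA_cons _ _ h2, hh] at *
    simp only [List.flatten_cons] at ih ⊢
    rw [ih]
    simp

-- the invariant relating B's scan state to A's split state
def BInv (cur : List Char) (acc : List (List Char)) (out : List Char) (prev : Option Char) (gap : Bool) : Prop :=
  (cur = [] ∧ acc = [] ∧ out = [] ∧ prev = none)
  ∨ (∃ a as, cur = [] ∧ acc = a :: as ∧ gap = true ∧ out = joinA acc.reverse ∧ prev = a.getLast?)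
  ∨ (cur ≠ [] ∧ gap = false ∧ out = joinA (acc.reverse ++ [cur.reverse]) ∧ prev = cur.head?)

lemma main_lemma : ∀ (cs cur : List Char) (acc : List (List Char)) (out : List Char)
    (prev : Option Char) (gap : Bool),
    (∀ w ∈ acc, w ≠ []) → BInv cur acc out prev gap →
    goB cs out prev gap = joinA (PySem.Chars.split₀.go cs cur acc) := by
  intro cs
  induction cs with
  | nil =>
    intro cur acc out prev gap hacc hinv
    rcases hinv with ⟨h1, h2, h3, h4⟩ | ⟨a, as, h1, h2, h3, h4, h5⟩ | ⟨h1, h2, h3, h4⟩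
    · simp [goB, PySem.Chars.split₀.go, h1, h2, h3, joinA, goA]
    · simp [goB, PySem.Chars.split₀.go, h1, h4]
    · simp [goB, PySem.Chars.split₀.go, h1, h3]
  | cons c cs ih =>
    intro cur acc out prev gap hacc hinv
    by_cases hsp : PySem.Chars.isspace c = true
    · -- whitespace: B sets gap, A closes/skips the current word
      rcases hinv with ⟨h1, h2, h3, h4⟩ | ⟨a, as, h1, h2, h3, h4, h5⟩ | ⟨h1, h2, h3, h4⟩
      · simp only [goB, hsp, if_pos, PySem.Chars.split₀.go, h1, List.isEmpty_nil]
        exact ih [] acc out prev true hacc (Or.inl ⟨rfl, h2, h3, h4⟩)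
      · simp only [goB, hsp, if_pos, PySem.Chars.split₀.go, h1, List.isEmpty_nil]
        exact ih [] acc out prev true hacc (Or.inr (Or.inl ⟨a, as, rfl, h2, rfl, h4, h5⟩))
      · have hne : cur.isEmpty = false := by simpa using h1
        simp only [goB, hsp, if_pos, PySem.Chars.split₀.go, hne, Bool.false_eq_true, if_false]
        apply ih [] (cur.reverse :: acc) out prev true
        · intro w hw
          rw [List.mem_cons] at hw
          rcases hw with hw | hw
          · rw [hw]; simpa using h1
          · exact hacc w hw
        · refine Or.inr (Or.inl ⟨cur.reverse, acc, rfl, rfl, rfl, ?_, ?_⟩)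
          · simp [h3]
          · simp [h4]
    · -- non-space char: B emits (maybe a space and) c, A extends the current word
      rcases hinv with ⟨h1, h2, h3, h4⟩ | ⟨a, as, h1, h2, h3, h4, h5⟩ | ⟨h1, h2, h3, h4⟩
      · simp only [goB, hsp, Bool.false_eq_true, if_false, PySem.Chars.split₀.go, h1, h2, h3, h4,
          List.isEmpty_nil, List.nil_append, altIsAlphaPrev_eq, isAlphaGetA, Bool.and_false,
          Bool.false_and]
        apply ih [c] [] [c] (some c) false (by simp)
        refine Or.inr (Or.inr ⟨by simp, rfl, ?_, rfl⟩)
        simp [joinA, goA]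
      · have ha : a ≠ [] := hacc a (by simp [h2])
        have hout : out ≠ [] := by
          rw [h4, h2]
          simp only [List.reverse_cons]
          rcases hr : as.reverse ++ [a] with _ | ⟨w, r⟩
          · simp at hr
          · apply joinA_ne_nil
            have hm : w ∈ as.reverse ++ [a] := by rw [hr]; simp
            rcases List.mem_append.mp hm with hm | hm
            · exact hacc w (by rw [h2]; exact List.mem_cons_of_mem _ (List.mem_reverse.mp hm))
            · simp at hm; rw [hm]; exact ha
        have hcond : (!out.isEmpty && gap && altIsAlphaPrev prev && altIsAlpha c)
            = (isAlphaGetA (PySem.List.pyGet? a (-1)) && isAlphaGetA (PySem.List.pyGet? [c] 0)) := by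
          rw [pyGet?_neg_one a ha, pyGet?_zero]
          have hoe : out.isEmpty = false := by simpa using hout
          simp [h3, h5, altIsAlphaPrev_eq, hoe, isAlphaGetA, alpha_eq]
        simp only [goB, hsp, Bool.false_eq_true, if_false, PySem.Chars.split₀.go, h1,
          List.isEmpty_nil, hcond]
        apply ih [c] acc _ (some c) false hacc
        refine Or.inr (Or.inr ⟨by simp, rfl, ?_, rfl⟩)
        have := joinA_append_word as.reverse a [c]
        rw [h4, h2]
        simp only [List.reverse_cons, List.reverse_nil, List.nil_append]
        rw [this]
        split <;> simp
      · have hne : cur.isEmpty = false := by simpa using h1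
        simp only [goB, hsp, Bool.false_eq_true, if_false, PySem.Chars.split₀.go, hne, h3, h2,
          Bool.and_false, Bool.false_and]
        apply ih (c :: cur) acc _ (some c) false hacc
        refine Or.inr (Or.inr ⟨by simp, rfl, ?_, rfl⟩)
        rw [show (c :: cur).reverse = cur.reverse ++ [c] from by simp,
          joinA_extend_last acc.reverse cur.reverse c (by simpa using h1)]

-- ===== VERDICT (by name: the statement is the Claim_ definition above) =====
theorem rm_redundant_space_in_str_spec : Claim_equal_rm_redundant_space_in_str := by
  intro s _
  unfold Spec_rm_redundant_space_in_str rm_redundant_space_in_str rm_redundant_space_in_str_alt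
  rw [main_lemma s.toList [] [] [] none false (by simp) (Or.inl ⟨rfl, rfl, rfl, rfl⟩)]
  simp [joinA, PySem.Chars.split₀]
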